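-- pv_equiv track=rewrite | github.com/eroge-69/PyToExe | python-files/enigma+.py | polybius_cipher
-- ===== SOURCE A (Python) =====
-- def polybius_cipher(text, alphabet):
--     text = text.upper()
--     size = 6
--     table = [alphabet[i:i+size] for i in range(0, len(alphabet), size)]
--     result = ""
--     for c in text:
--         found = False
--         for i, row in enumerate(table):
--             if c in row:
--                 result += f"{i+1}{row.index(c)+1} "
--                 found = True
--                 break
--         if not found:
--             result += c
--     return result.strip()
-- ===== SOURCE B (Python) =====
-- def polybius_cipher(text, alphabet):
--     pieces = []
--     for c in text.upper():
--         if c in alphabet: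
--             row, col = divmod(alphabet.index(c), 6)
--             pieces.append(f"{row + 1}{col + 1} ")
--         else:
--             pieces.append(c)
--     return "".join(pieces).strip()
-- ===== Notes on version B (the rewrite author's own statement) =====
-- stated objective: faster
-- what changed: B drops the 2D table: instead of building row slices and scanning each row per character while growing the result by string +=, it takes the character's first index in the flat alphabet, derives row/column by divmod(idx, 6), collects pieces in a list and joins once.
import Mathlib
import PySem

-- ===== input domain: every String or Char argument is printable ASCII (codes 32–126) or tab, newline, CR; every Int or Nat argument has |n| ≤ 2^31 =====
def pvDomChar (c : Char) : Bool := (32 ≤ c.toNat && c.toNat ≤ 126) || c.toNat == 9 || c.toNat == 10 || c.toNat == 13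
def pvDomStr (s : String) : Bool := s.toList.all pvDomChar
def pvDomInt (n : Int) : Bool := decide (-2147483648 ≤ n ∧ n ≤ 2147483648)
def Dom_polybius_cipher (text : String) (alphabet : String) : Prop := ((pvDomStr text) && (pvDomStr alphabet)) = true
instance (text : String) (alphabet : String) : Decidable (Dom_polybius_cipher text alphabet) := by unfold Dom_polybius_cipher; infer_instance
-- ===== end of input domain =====

-- B drops A's 2D table (row slices + per-row scan) for a flat first-index lookup with divmod(idx, 6), joining pieces once instead of string +=; objective: faster (measured).

-- ===== PORT A =====
-- table = [alphabet[i:i+size] for i in range(0, len(alphabet), size)], size = 6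
def pvTableA (al : List Char) : List (List Char) :=
  (PySem.List.pyRange 0 al.length 6).map (fun i => PySem.List.slice al (some i) (some (i + 6)))

-- the inner 'for i, row in enumerate(table): if c in row: … break' loop; returns the appended chunk
def pvInnerA (c : Char) (i : Nat) : List (List Char) → Option (List Char)
  | [] => none
  | row :: rest =>
    if c ∈ row then
      some (PySem.Int.toChars ((i : Int) + 1) ++
            PySem.Int.toChars ((((PySem.List.index? row c).getD 0 : Nat) : Int) + 1) ++ [' '])
    else pvInnerA c (i + 1) rest

def polybius_cipher (text : String) (alphabet : String) : String :=
  let t := PySem.Chars.upper text.toList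
  let table := pvTableA alphabet.toList
  let result := t.foldl (fun acc c =>
    match pvInnerA c 0 table with
    | some s => acc ++ s
    | none => acc ++ [c]) ([] : List Char)
  String.mk (PySem.Chars.strip result)

-- ===== PORT B =====
-- per character: if c in alphabet: row, col = divmod(alphabet.index(c), 6)  (index ≥ 0, so Nat '/'/'%' is Python's divmod)
def polybius_cipher_alt (text : String) (alphabet : String) : String :=
  let al := alphabet.toList
  let pieces := (PySem.Chars.upper text.toList).foldl (fun acc c =>
    if c ∈ al then
      let idx := (PySem.List.index? al c).getD 0
      acc ++ (PySem.Int.toChars (((idx / 6 : Nat) : Int) + 1) ++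
              PySem.Int.toChars (((idx % 6 : Nat) : Int) + 1) ++ [' '])
    else acc ++ [c]) ([] : List Char)
  String.mk (PySem.Chars.strip pieces)

-- ===== PRECONDITION & SPEC =====
def Spec_polybius_cipher (text : String) (alphabet : String) (out : String) : Prop := out = polybius_cipher_alt text alphabet
instance (text : String) (alphabet : String) (out : String) : Decidable (Spec_polybius_cipher text alphabet out) := by unfold Spec_polybius_cipher; infer_instance

-- ===== CLAIM (what is proved, stated in full; the proofs are below) =====
def Claim_equal_polybius_cipher : Prop := ∀ (text : String) (alphabet : String), Dom_polybius_cipher text alphabet → Spec_polybius_cipher text alphabet (polybius_cipher text alphabet)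

-- ===== LEMMAS AND PROOFS =====

theorem pv_idxOf?_of_mem (c : Char) (l : List Char) (h : c ∈ l) :
    List.idxOf? c l = some (List.idxOf c l) := by
  induction l with
  | nil => simp at h
  | cons x xs ih =>
    by_cases hx : x = c
    · simp [List.idxOf?, List.idxOf, hx, List.findIdx?_cons, List.findIdx_cons]
    · have hc : c ∈ xs := by
        rcases List.mem_cons.mp h with h1 | h1
        · exact absurd h1.symm hx
        · exact h1
      have hb : (x == c) = false := by simpa using hx
      simp only [List.idxOf?, List.idxOf, List.findIdx?_cons, List.findIdx_cons, hb, cond_false] at *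
      rw [ih hc]; simp [Option.map]

-- the table as a structural recursion (proof-side view of pvTableA)
def pvChunksRec (l : List Char) : List (List Char) :=
  if h : l = [] then [] else l.take 6 :: pvChunksRec (l.drop 6)
termination_by l.length
decreasing_by
  have h0 : 0 < l.length := List.length_pos_of_ne_nil h
  simp only [List.length_drop]
  omega

theorem pv_rangeChunks (n : Nat) : ∀ al : List Char, al.length = n →
    (List.range ((al.length + 5) / 6)).map (fun k => (al.drop (6 * k)).take 6) = pvChunksRec al := by
  induction n using Nat.strong_induction_on with
  | _ n ih =>
    intro al hlen
    by_cases hnil : al = []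
    · subst hnil; simp [pvChunksRec]
    · have hpos : 1 ≤ al.length := by
        cases al with
        | nil => exact absurd rfl hnil
        | cons x xs => simp
      have hsplit : (al.length + 5) / 6 = ((al.drop 6).length + 5) / 6 + 1 := by
        simp only [List.length_drop]; omega
      rw [pvChunksRec]; simp only [hnil, dite_false]
      rw [hsplit, List.range_succ_eq_map, List.map_cons, List.map_map]
      simp only [Nat.mul_zero, List.drop_zero]
      congr 1
      have hcomp : ((fun k => (al.drop (6 * k)).take 6) ∘ (fun i => i + 1)) =
          (fun k => ((al.drop 6).drop (6 * k)).take 6) := by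
        funext k
        simp only [Function.comp, List.drop_drop]
        ring_nf
      rw [hcomp]
      exact ih (al.drop 6).length (by simp only [List.length_drop]; omega) (al.drop 6) rfl

theorem pv_tableA_eq (al : List Char) : pvTableA al = pvChunksRec al := by
  rw [← pv_rangeChunks al.length al rfl]
  unfold pvTableA
  rw [PySem.List.pyRange_of_pos 0 (al.length : Int) (by norm_num)]
  have hN : (if (0 : Int) < (al.length : Int) then (((al.length : Int) - 0 + 6 - 1) / 6).toNat else 0) =
      (al.length + 5) / 6 := by
    by_cases h : (0 : Int) < (al.length : Int)
    · simp only [h, if_true]; omega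
    · simp only [h, if_false]
      have : al.length = 0 := by omega
      simp [this]
  rw [hN, List.map_map]
  apply List.map_congr_left
  intro k _
  have h1 : (0 : Int) + 6 * (k : Int) = ((6 * k : Nat) : Int) := by push_cast; ring
  simp only [Function.comp]
  rw [h1]
  exact_mod_cast PySem.List.slice_natCast_add al (6 * k) 6

theorem pv_innerA_eq (n : Nat) : ∀ (al : List Char), al.length = n → ∀ (k : Nat) (c : Char),
    pvInnerA c k (pvChunksRec al) =
      if c ∈ al then
        some (PySem.Int.toChars (((k + List.idxOf c al / 6 : Nat) : Int) + 1) ++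
              PySem.Int.toChars (((List.idxOf c al % 6 : Nat) : Int) + 1) ++ [' '])
      else none := by
  induction n using Nat.strong_induction_on with
  | _ n ih =>
    intro al hlen k c
    by_cases hnil : al = []
    · subst hnil; simp [pvChunksRec, pvInnerA]
    · rw [pvChunksRec]; simp only [hnil, dite_false]
      rw [pvInnerA]
      by_cases hct : c ∈ al.take 6
      · have hmem : c ∈ al := List.mem_of_mem_take hct
        have hidx : List.idxOf c al = List.idxOf c (al.take 6) := by
          conv_lhs => rw [← List.take_append_drop 6 al]
          rw [List.idxOf_append, if_pos hct]
        have hlt : List.idxOf c (al.take 6) < 6 := by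
          have := List.idxOf_lt_length_of_mem hct
          have h6 : (al.take 6).length ≤ 6 := by simp
          omega
        rw [if_pos hct, if_pos hmem]
        rw [PySem.List.index?_eq_idxOf?, pv_idxOf?_of_mem c _ hct]
        rw [hidx]
        have hdiv : List.idxOf c (al.take 6) / 6 = 0 := Nat.div_eq_of_lt hlt
        have hmod : List.idxOf c (al.take 6) % 6 = List.idxOf c (al.take 6) := Nat.mod_eq_of_lt hlt
        rw [hdiv, hmod]
        simp
      · rw [if_neg hct]
        have hdroplen : (al.drop 6).length < n := by
          rw [← hlen]
          cases al with
          | nil => exact absurd rfl hnil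
          | cons x xs => simp
        rw [ih (al.drop 6).length hdroplen (al.drop 6) rfl (k + 1) c]
        by_cases hcd : c ∈ al.drop 6
        · have hmem : c ∈ al := by
            have h' := List.mem_append_right (al.take 6) hcd
            rwa [List.take_append_drop] at h'
          have hlong : 6 < al.length := by
            by_contra hle
            have : al.drop 6 = [] := List.drop_eq_nil_of_le (by omega)
            rw [this] at hcd; simp at hcd
          have htlen : (al.take 6).length = 6 := by simp; omega
          have hidx : List.idxOf c al = List.idxOf c (al.drop 6) + 6 := by
            conv_lhs => rw [← List.take_append_drop 6 al]
            rw [List.idxOf_append, if_neg hct, htlen]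
          rw [if_pos hcd, if_pos hmem, hidx]
          have e1 : (k + 1) + List.idxOf c (al.drop 6) / 6 =
              k + (List.idxOf c (al.drop 6) + 6) / 6 := by omega
          have e2 : List.idxOf c (al.drop 6) % 6 = (List.idxOf c (al.drop 6) + 6) % 6 := by omega
          rw [e1, e2]
        · rw [if_neg hcd]
          have : c ∉ al := by
            intro hmem
            rw [← List.take_append_drop 6 al] at hmem
            rcases List.mem_append.mp hmem with h | h
            · exact hct h
            · exact hcd h
          rw [if_neg this]

theorem pv_foldl_ext {α β : Type} (f g : α → β → α) (h : ∀ a b, f a b = g a b)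
    (init : α) (l : List β) : l.foldl f init = l.foldl g init := by
  have hfg : f = g := funext fun a => funext fun b => h a b
  rw [hfg]

-- ===== VERDICT (by name: the statement is the Claim_ definition above) =====
theorem polybius_cipher_spec : Claim_equal_polybius_cipher := by
  intro text alphabet _
  unfold Spec_polybius_cipher polybius_cipher polybius_cipher_alt
  set al := alphabet.toList with hal
  dsimp only
  congr 2
  apply pv_foldl_ext
  intro acc c
  rw [pv_tableA_eq, pv_innerA_eq al.length al rfl 0 c]
  by_cases hmem : c ∈ al
  · rw [if_pos hmem, if_pos hmem]
    rw [PySem.List.index?_eq_idxOf?, pv_idxOf?_of_mem c _ hmem]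
    simp
  · rw [if_neg hmem, if_neg hmem]
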